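-- pv_equiv track=rewrite | github.com/zhenjia2017/FAITH | faith/faithful_er/evidence_pruning/pruning.py | reason_start
-- ===== SOURCE A (Python) =====
-- def reason_start(main_timespans, constraint_timespans):
--     for main_timespan in main_timespans:
--         evi_begin = main_timespan[0]
--         for constraint_timespan in constraint_timespans:
--             constraint_start = constraint_timespan[0]
--             if evi_begin == constraint_start:
--                 return True
--     return False
-- ===== SOURCE B (Python) =====
-- def reason_start(main_timespans, constraint_timespans):
--     xs = sorted(ts[0] for ts in main_timespans)
--     ys = sorted(ts[0] for ts in constraint_timespans)
--     i = j = 0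
--     while i < len(xs) and j < len(ys):
--         if xs[i] == ys[j]:
--             return True
--         if xs[i] < ys[j]:
--             i += 1
--         else:
--             j += 1
--     return False
-- ===== Notes on version B (the rewrite author's own statement) =====
-- stated objective: alternative
-- what changed: Replaced the nested scan with an inner membership test by sorting the two extracted start lists and running a single two-pointer merge sweep that advances the smaller side until a common value is met.
-- outside the precondition, e.g. on reason_start([[1], []], [[1]]): A returns True, B raises IndexError
import Mathlib
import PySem

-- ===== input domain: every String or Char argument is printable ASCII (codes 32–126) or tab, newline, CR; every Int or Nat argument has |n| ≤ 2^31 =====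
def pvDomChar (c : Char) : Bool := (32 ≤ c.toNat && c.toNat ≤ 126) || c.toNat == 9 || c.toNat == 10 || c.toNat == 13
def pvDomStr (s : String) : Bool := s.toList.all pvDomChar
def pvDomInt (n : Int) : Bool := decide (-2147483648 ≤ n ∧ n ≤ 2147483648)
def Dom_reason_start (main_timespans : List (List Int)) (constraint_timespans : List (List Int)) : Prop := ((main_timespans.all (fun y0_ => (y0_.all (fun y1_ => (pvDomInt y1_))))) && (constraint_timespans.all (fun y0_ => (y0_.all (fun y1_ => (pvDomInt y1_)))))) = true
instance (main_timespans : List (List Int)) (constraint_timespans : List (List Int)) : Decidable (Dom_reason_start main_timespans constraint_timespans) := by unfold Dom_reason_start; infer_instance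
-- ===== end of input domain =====

-- ===== PORT A =====
-- B sorts the two start lists and runs a two-pointer merge sweep instead of A's nested scan (alternative algorithm, not claimed faster).
def reason_start (main_timespans : List (List Int)) (constraint_timespans : List (List Int)) : Bool :=
  -- for main_timespan in main_timespans: evi_begin = main_timespan[0];
  --   for constraint_timespan in constraint_timespans: if evi_begin == constraint_timespan[0]: return True
  -- return False   (early return on first match = List.any)
  main_timespans.any (fun main_timespan =>
    let evi_begin := PySem.List.pyGetD main_timespan 0 0   -- main_timespan[0]; Pre_ keeps it in range
    constraint_timespans.any (fun constraint_timespan =>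
      let constraint_start := PySem.List.pyGetD constraint_timespan 0 0
      evi_begin == constraint_start))

-- ===== PORT B =====
-- the while loop over indices i, j: advancing an index = recursing on the tail of that side
def reason_start_alt_sweep : List Int → List Int → Bool
  | [], _ => false
  | _ :: _, [] => false
  | x :: xs, y :: ys =>
    if x == y then true
    else if x < y then reason_start_alt_sweep xs (y :: ys)
    else reason_start_alt_sweep (x :: xs) ys

def reason_start_alt (main_timespans : List (List Int)) (constraint_timespans : List (List Int)) : Bool :=
  let xs := PySem.List.sorted (main_timespans.map (fun ts => PySem.List.pyGetD ts 0 0)) (fun v => v) false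
  let ys := PySem.List.sorted (constraint_timespans.map (fun ts => PySem.List.pyGetD ts 0 0)) (fun v => v) false
  reason_start_alt_sweep xs ys

-- ===== PRECONDITION & SPEC =====
-- Pre_ excludes inputs containing an empty timespan: indexing ts[0] raises IndexError in both
-- programs on most such inputs; A can still return True by short-circuiting before it reaches an
-- empty main timespan (or when constraint_timespans is empty), where B raises — those are excluded too.
def Pre_reason_start (main_timespans : List (List Int)) (constraint_timespans : List (List Int)) : Prop :=
  (∀ ts ∈ main_timespans, ts ≠ []) ∧ (∀ ts ∈ constraint_timespans, ts ≠ [])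
instance (main_timespans : List (List Int)) (constraint_timespans : List (List Int)) : Decidable (Pre_reason_start main_timespans constraint_timespans) := by unfold Pre_reason_start; infer_instance
def pvWitness_reason_start : List (List Int) × List (List Int) := ([[1, 2], [3]], [[3, 5]])

def Spec_reason_start (main_timespans : List (List Int)) (constraint_timespans : List (List Int)) (out : Bool) : Prop := out = reason_start_alt main_timespans constraint_timespans
instance (main_timespans : List (List Int)) (constraint_timespans : List (List Int)) (out : Bool) : Decidable (Spec_reason_start main_timespans constraint_timespans out) := by unfold Spec_reason_start; infer_instance

-- ===== CLAIM (what is proved, stated in full; the proofs are below) =====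
def Claim_equal_reason_start : Prop := ∀ (main_timespans : List (List Int)) (constraint_timespans : List (List Int)), Dom_reason_start main_timespans constraint_timespans → Pre_reason_start main_timespans constraint_timespans → Spec_reason_start main_timespans constraint_timespans (reason_start main_timespans constraint_timespans)

-- ===== LEMMAS AND PROOFS =====

-- on sorted lists the merge sweep decides exactly "the two lists share an element"
theorem sweep_iff (xs ys : List Int) (hx : xs.Pairwise (· ≤ ·)) (hy : ys.Pairwise (· ≤ ·)) :
    reason_start_alt_sweep xs ys = true ↔ ∃ v, v ∈ xs ∧ v ∈ ys := by
  fun_induction reason_start_alt_sweep xs ys with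
  | case1 ys => simp
  | case2 x xs => simp
  | case3 x xs y ys hxy =>
    simp only [beq_iff_eq] at hxy
    subst hxy
    simp
  | case4 x xs y ys hne hlt ih =>
    rw [ih hx.of_cons hy]
    constructor
    · rintro ⟨v, hv1, hv2⟩; exact ⟨v, List.mem_cons_of_mem _ hv1, hv2⟩
    · rintro ⟨v, hv1, hv2⟩
      rcases List.mem_cons.mp hv1 with rfl | hv1
      · -- v = x is in y::ys, but every element of y::ys is ≥ y > x: contradiction
        exfalso
        rcases List.mem_cons.mp hv2 with rfl | hv2
        · exact absurd hlt (lt_irrefl v)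
        · have := (List.pairwise_cons.mp hy).1 _ hv2
          omega
      · exact ⟨v, hv1, hv2⟩
  | case5 x xs y ys hne hnlt ih =>
    rw [ih hx hy.of_cons]
    constructor
    · rintro ⟨v, hv1, hv2⟩; exact ⟨v, hv1, List.mem_cons_of_mem _ hv2⟩
    · rintro ⟨v, hv1, hv2⟩
      rcases List.mem_cons.mp hv2 with rfl | hv2
      · exfalso
        rcases List.mem_cons.mp hv1 with rfl | hv1
        · simp at hne
        · have := (List.pairwise_cons.mp hx).1 _ hv1
          simp only [beq_iff_eq] at hne
          omega
      · exact ⟨v, hv1, hv2⟩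

-- ===== VERDICT (by name: the statement is the Claim_ definition above) =====
theorem reason_start_spec : Claim_equal_reason_start := by
  intro m c _ _
  unfold Spec_reason_start reason_start reason_start_alt
  rw [Bool.eq_iff_iff]
  rw [sweep_iff _ _ (by simpa using PySem.List.sorted_pairwise (key := fun v => v) (xs := m.map (fun ts => PySem.List.pyGetD ts 0 0)))
        (by simpa using PySem.List.sorted_pairwise (key := fun v => v) (xs := c.map (fun ts => PySem.List.pyGetD ts 0 0)))]
  simp only [List.any_eq_true, beq_iff_eq, PySem.List.mem_sorted, List.mem_map]
  constructor
  · rintro ⟨ts, hts, ct, hct, h⟩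
    exact ⟨_, ⟨ts, hts, rfl⟩, ⟨ct, hct, h.symm⟩⟩
  · rintro ⟨v, ⟨ts, hts, rfl⟩, ⟨ct, hct, h⟩⟩
    exact ⟨ts, hts, ct, hct, h.symm⟩
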